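-- pv_equiv track=rewrite | github.com/reed23313/keysight-awg | SNSPD_counter_2bit.py | make_word
-- ===== SOURCE A (Python) =====
-- def make_word(value, bits, pulse, freq, fs):
--     period_samples = int(fs)//int(freq)
--     if len(pulse) > period_samples:
--         raise ValueError(f"frequency {freq} is too high for the selected pulse length of {len(pulse)} at sample rate {fs}")
--     word = []
--     for i in range(bits):
--         if value & 1:
--             # binary 1
--             word += pulse + [0]*(period_samples - len(pulse))
--         else:
--             # binary 0
--             word += [0]*period_samples
--         value >>= 1
--     return word
-- ===== SOURCE B (Python) =====
-- def make_word(value, bits, pulse, freq, fs):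
--     period_samples = int(fs)//int(freq)
--     if len(pulse) > period_samples:
--         raise ValueError(f"frequency {freq} is too high for the selected pulse length of {len(pulse)} at sample rate {fs}")
--     if bits <= 0:
--         return []
--     one = pulse + [0]*(period_samples - len(pulse))
--     zero = [0]*period_samples
--     def rec(v, b):
--         # divide and conquer on the bit range: low half, then high half of v
--         if b <= 0:
--             return []
--         if b == 1:
--             return one if v & 1 else zero
--         h = b // 2
--         return rec(v, h) + rec(v >> h, b - h)
--     return rec(value, bits)
-- ===== Notes on version B (the rewrite author's own statement) =====
-- stated objective: alternative
-- what changed: B precomputes the two possible one-period blocks and assembles the word by divide-and-conquer recursion on the bit range (recurse on the low half of the bits, then on value >> h for the high half, concatenating the halves), instead of A's sequential loop that appends one block per bit while shifting value in place.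
import Mathlib
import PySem

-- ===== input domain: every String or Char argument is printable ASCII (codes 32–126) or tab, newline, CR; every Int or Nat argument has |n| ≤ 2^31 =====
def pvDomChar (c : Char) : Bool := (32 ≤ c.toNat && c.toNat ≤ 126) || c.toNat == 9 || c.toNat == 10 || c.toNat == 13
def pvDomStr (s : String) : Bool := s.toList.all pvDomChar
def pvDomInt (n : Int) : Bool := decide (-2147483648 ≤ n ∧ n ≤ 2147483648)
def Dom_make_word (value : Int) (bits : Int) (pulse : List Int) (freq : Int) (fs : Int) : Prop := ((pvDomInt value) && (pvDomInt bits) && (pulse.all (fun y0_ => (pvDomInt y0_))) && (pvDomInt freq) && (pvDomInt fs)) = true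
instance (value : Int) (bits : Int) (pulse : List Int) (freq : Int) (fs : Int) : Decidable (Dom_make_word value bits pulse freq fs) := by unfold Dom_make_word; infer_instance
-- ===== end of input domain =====

-- B precomputes the two one-period blocks and assembles the word by divide-and-conquer
-- recursion on the bit range, instead of A's append-one-block-per-bit loop; objective: alternative.

-- ===== PORT A =====
-- the loop body never uses i, so `for i in range(bits)` is iterated bits.toNat times
def make_word_loopA (pulse : List Int) (ps : Int) : Nat → List Int → Int → List Int
  | 0, word, _ => word
  | n + 1, word, v =>
      make_word_loopA pulse ps n
        (if PySem.Int.mod v 2 = 1 then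
            word ++ (pulse ++ List.replicate (ps - (pulse.length : Int)).toNat 0)
          else
            word ++ List.replicate ps.toNat 0)
        (PySem.Int.floordiv v 2)

def make_word (value : Int) (bits : Int) (pulse : List Int) (freq : Int) (fs : Int) : List Int :=
  let period_samples := PySem.Int.floordiv fs freq
  if (pulse.length : Int) > period_samples then []   -- raise ValueError: excluded by Pre_
  else make_word_loopA pulse period_samples bits.toNat [] value

-- ===== PORT B =====
-- B's inner `rec`: `v & 1` is v mod 2, `v >> h` is floor division by 2^h, `b // 2` on a Nat
def make_word_rec (zero one : List Int) : Int → Nat → List Int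
  | _, 0 => []
  | v, 1 => if PySem.Int.mod v 2 = 1 then one else zero
  | v, b + 2 =>
      make_word_rec zero one v ((b + 2) / 2) ++
      make_word_rec zero one (PySem.Int.floordiv v (2 ^ ((b + 2) / 2))) ((b + 2) - (b + 2) / 2)
  termination_by _ b => b
  decreasing_by all_goals omega

def make_word_alt (value : Int) (bits : Int) (pulse : List Int) (freq : Int) (fs : Int) : List Int :=
  let period_samples := PySem.Int.floordiv fs freq
  if (pulse.length : Int) > period_samples then []   -- raise ValueError: excluded by Pre_
  else if bits ≤ 0 then []
  else
    let one := pulse ++ List.replicate (period_samples - (pulse.length : Int)).toNat 0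
    let zero := List.replicate period_samples.toNat 0
    make_word_rec zero one value bits.toNat

-- ===== PRECONDITION & SPEC =====
-- exactly the inputs where Python A returns: freq ≠ 0 (else ZeroDivisionError) and
-- len(pulse) ≤ fs // freq (else ValueError)
def Pre_make_word (value : Int) (bits : Int) (pulse : List Int) (freq : Int) (fs : Int) : Prop :=
  freq ≠ 0 ∧ (pulse.length : Int) ≤ PySem.Int.floordiv fs freq

instance (value : Int) (bits : Int) (pulse : List Int) (freq : Int) (fs : Int) : Decidable (Pre_make_word value bits pulse freq fs) := by unfold Pre_make_word; infer_instance

def pvWitness_make_word : Int × Int × List Int × Int × Int := (5, 3, [7, 7], 2, 10)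

def Spec_make_word (value : Int) (bits : Int) (pulse : List Int) (freq : Int) (fs : Int) (out : List Int) : Prop := out = make_word_alt value bits pulse freq fs
instance (value : Int) (bits : Int) (pulse : List Int) (freq : Int) (fs : Int) (out : List Int) : Decidable (Spec_make_word value bits pulse freq fs out) := by unfold Spec_make_word; infer_instance

-- ===== CLAIM (what is proved, stated in full; the proofs are below) =====
def Claim_equal_make_word : Prop := ∀ (value : Int) (bits : Int) (pulse : List Int) (freq : Int) (fs : Int), Dom_make_word value bits pulse freq fs → Pre_make_word value bits pulse freq fs → Spec_make_word value bits pulse freq fs (make_word value bits pulse freq fs)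

-- ===== LEMMAS AND PROOFS =====

-- the block emitted for bit i of value
def pvBlk (zero one : List Int) (value : Int) (i : Nat) : List Int :=
  if PySem.Int.mod (PySem.Int.floordiv value (2 ^ i)) 2 = 1 then one else zero

theorem pv_fdiv_pow (v : Int) (a c : Nat) :
    PySem.Int.floordiv (PySem.Int.floordiv v (2 ^ a)) (2 ^ c) = PySem.Int.floordiv v (2 ^ (a + c)) := by
  have h1 : (0:Int) < 2 ^ a := by positivity
  have h2 : (0:Int) < 2 ^ c := by positivity
  have h3 : (0:Int) < 2 ^ (a + c) := by positivity
  rw [PySem.Int.floordiv_eq_ediv_of_pos h1, PySem.Int.floordiv_eq_ediv_of_pos h2,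
      PySem.Int.floordiv_eq_ediv_of_pos h3, Int.ediv_ediv_of_nonneg (le_of_lt h1), pow_add]

-- A's loop: accumulator pulled out, value generalized to floordiv value 2^k
theorem loopA_eq (pulse : List Int) (ps : Int) (value : Int) :
    ∀ (n k : Nat) (w : List Int),
      make_word_loopA pulse ps n w (PySem.Int.floordiv value (2 ^ k)) =
        w ++ (List.range n).flatMap
          (fun i => pvBlk (List.replicate ps.toNat 0)
            (pulse ++ List.replicate (ps - (pulse.length : Int)).toNat 0) value (k + i)) := by
  intro n
  induction n with
  | zero => simp [make_word_loopA]
  | succ n ih =>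
    intro k w
    have hstep : PySem.Int.floordiv (PySem.Int.floordiv value (2 ^ k)) 2
        = PySem.Int.floordiv value (2 ^ (k + 1)) := by
      simpa using pv_fdiv_pow value k 1
    rw [make_word_loopA, hstep, ih (k + 1), List.range_succ_eq_map]
    simp only [List.flatMap_cons, List.flatMap_map, Nat.add_zero]
    have hsh : ∀ i, k + 1 + i = k + (i + 1) := by omega
    simp only [hsh]
    unfold pvBlk
    split <;> simp

-- B's recursion equals the same flatMap of per-bit blocks
theorem recB_eq (zero one : List Int) :
    ∀ (b : Nat) (v : Int),
      make_word_rec zero one v b = (List.range b).flatMap (fun i => pvBlk zero one v i) := by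
  intro b
  induction b using Nat.strong_induction_on with
  | _ b ih =>
    intro v
    match b with
    | 0 => simp [make_word_rec]
    | 1 =>
      simp [make_word_rec, pvBlk, List.range_succ]
    | b + 2 =>
      rw [make_word_rec, ih ((b + 2) / 2) (by omega), ih ((b + 2) - (b + 2) / 2) (by omega)]
      have hsplit : b + 2 = (b + 2) / 2 + ((b + 2) - (b + 2) / 2) := by omega
      conv_rhs => rw [hsplit]
      rw [List.range_add, List.flatMap_append, List.flatMap_map]
      congr 1
      apply List.flatMap_congr
      intro i _
      unfold pvBlk
      rw [pv_fdiv_pow]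

-- ===== VERDICT (by name: the statement is the Claim_ definition above) =====
theorem make_word_spec : Claim_equal_make_word := by
  intro value bits pulse freq fs _ hpre
  unfold Spec_make_word make_word make_word_alt
  obtain ⟨hf, hle⟩ := hpre
  simp only [gt_iff_lt, not_lt.mpr hle, if_false]
  by_cases hb : bits ≤ 0
  · have : bits.toNat = 0 := by omega
    simp [hb, this, make_word_loopA, make_word_rec]
  simp only [if_neg hb]
  have h0 : value = PySem.Int.floordiv value (2 ^ 0) := by
    rw [pow_zero, PySem.Int.floordiv_eq_ediv_of_pos (by omega : (0:Int) < 1), Int.ediv_one]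
  rw [recB_eq]
  conv_lhs => rw [h0]
  rw [loopA_eq pulse _ value bits.toNat 0]
  simp
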